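-- pv_equiv track=rewrite | github.com/anantiakeshri/placement | Max_Amount.py | maxAmt
-- ===== SOURCE A (Python) =====
-- def maxAmt( A, B):
--     max_so_far = 0
--     current_sum = 0
--     for i in range(len(A)):
--         current_sum += A[i]
--         if current_sum > B:
--             break
--         else:
--             max_so_far = max(max_so_far, current_sum)
--     return max_so_far
-- ===== SOURCE B (Python) =====
-- def maxAmt(A, B):
--     ps = []
--     s = 0
--     for x in A:
--         s += x
--         ps.append(s)
--     bad = [i for i, v in enumerate(ps) if v > B]
--     k = bad[0] if bad else len(ps)
--     return max([0] + ps[:k])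
-- ===== Notes on version B (the rewrite author's own statement) =====
-- stated objective: alternative
-- what changed: Replaces the single imperative loop with early break by three passes: build the full prefix-sum list, locate the first index exceeding B via an enumerate-filter, and take the max (floored at 0) of the prefix up to that cutoff.
import Mathlib
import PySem

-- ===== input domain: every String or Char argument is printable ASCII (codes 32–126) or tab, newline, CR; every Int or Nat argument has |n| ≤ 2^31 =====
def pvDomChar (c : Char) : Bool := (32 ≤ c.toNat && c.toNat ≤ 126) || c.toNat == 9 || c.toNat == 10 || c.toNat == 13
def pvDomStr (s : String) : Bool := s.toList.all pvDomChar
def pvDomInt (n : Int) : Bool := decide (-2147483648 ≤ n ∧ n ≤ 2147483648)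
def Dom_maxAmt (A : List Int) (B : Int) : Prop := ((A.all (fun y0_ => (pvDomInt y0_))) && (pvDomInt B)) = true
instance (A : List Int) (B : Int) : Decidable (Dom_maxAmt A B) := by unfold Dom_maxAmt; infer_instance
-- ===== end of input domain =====

-- B rewrites A's single loop with early break as three passes (prefix sums, first-violation index, bounded max); same values, no speed claim.

-- ===== PORT A =====
-- the loop: current_sum accumulates, break on current_sum > B, else track max_so_far
def maxAmtGo (B : Int) : List Int → Int → Int → Int
  | [], _, msf => msf
  | a :: t, cur, msf =>
    let c := cur + a
    if c > B then msf else maxAmtGo B t c (max msf c)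

def maxAmt (A : List Int) (B : Int) : Int := maxAmtGo B A 0 0

-- ===== PORT B =====
-- the first loop of Source B: running sum appended to ps
def prefixSums (cur : Int) : List Int → List Int
  | [] => []
  | x :: t => (cur + x) :: prefixSums (cur + x) t

def maxAmt_alt (A : List Int) (B : Int) : Int :=
  let ps := prefixSums 0 A
  let bad := ((PySem.List.enumerate ps).filter (fun p => p.2 > B)).map (·.1)
  let k := bad.head?.getD (ps.length : Int)
  -- max([0] + ps[:k]) : Python's max scans left to right starting from 0
  List.foldl max 0 (ps.take k.toNat)

-- ===== PRECONDITION & SPEC =====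
def Spec_maxAmt (A : List Int) (B : Int) (out : Int) : Prop := out = maxAmt_alt A B
instance (A : List Int) (B : Int) (out : Int) : Decidable (Spec_maxAmt A B out) := by unfold Spec_maxAmt; infer_instance

-- ===== CLAIM =====
def Claim_equal_maxAmt : Prop := ∀ (A : List Int) (B : Int), Dom_maxAmt A B → Spec_maxAmt A B (maxAmt A B)

-- ===== LEMMAS AND PROOFS =====

-- the cutoff computed by enumerate-filter-head turns take into takeWhile
lemma take_firstBad (B : Int) (l : List Int) (s : Int) (hs : 0 ≤ s) :
    l.take (((((PySem.List.enumerate l s).filter (fun p => p.2 > B)).map (·.1)).head?.getD (s + l.length)) - s).toNat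
      = l.takeWhile (fun v => decide (v ≤ B)) := by
  induction l generalizing s with
  | nil => simp
  | cons x t ih =>
    simp only [PySem.List.enumerate_cons, List.filter_cons, List.takeWhile_cons]
    by_cases hx : x > B
    · simp [hx, not_le.mpr hx]
    · have hx' : x ≤ B := not_lt.mp hx
      simp only [hx, decide_false, Bool.false_eq_true, if_false, hx', decide_true, if_true]
      have h1 : (0:Int) ≤ s + 1 := by omega
      have := ih (s + 1) h1
      rcases hhead : (((PySem.List.enumerate t (s+1)).filter (fun p => p.2 > B)).map (·.1)).head? with _ | ⟨j⟩
      · have htail : t.take (((s:Int) + 1 + (t.length:Int)) - (s+1)).toNat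
            = t.takeWhile (fun v => decide (v ≤ B)) := by
          have := ih (s+1) h1; rw [hhead] at this; simpa using this
        rw [show ((s:Int) + 1 + (t.length:Int) - (s+1)).toNat = t.length by omega,
            List.take_length] at htail
        rw [hhead]
        simp only [Option.getD_none]
        rw [show ((s:Int) + (x :: t).length - s).toNat = t.length + 1 by
              simp only [List.length_cons]; omega,
            List.take_succ_cons, List.take_length]
        conv_rhs => rw [← htail]
      · have hj : j ∈ (((PySem.List.enumerate t (s+1)).filter (fun p => p.2 > B)).map (·.1)) :=
          List.mem_of_mem_head? (by simp [hhead])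
        have hge : s + 1 ≤ j := by
          rcases List.mem_map.mp hj with ⟨p, hp, hpe⟩
          rcases (PySem.List.mem_enumerate_iff t (s+1) p).mp (List.mem_of_mem_filter hp)
            with ⟨k, hk, rfl⟩
          simp at hpe; omega
        have htail : t.take ((j - (s+1)).toNat) = t.takeWhile (fun v => decide (v ≤ B)) := by
          have := ih (s+1) h1; rw [hhead] at this; simpa using this
        rw [hhead]
        simp only [Option.getD_some]
        rw [show (j - s).toNat = (j - (s+1)).toNat + 1 by omega,
            List.take_succ_cons, htail]

-- the loop with break equals fold of max over takeWhile of prefix sums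
lemma go_eq_fold (B : Int) (t : List Int) (cur msf : Int) :
    maxAmtGo B t cur msf
      = List.foldl max msf ((prefixSums cur t).takeWhile (fun v => decide (v ≤ B))) := by
  induction t generalizing cur msf with
  | nil => simp [maxAmtGo, prefixSums]
  | cons a t ih =>
    simp only [maxAmtGo, prefixSums, List.takeWhile_cons]
    by_cases h : cur + a > B
    · simp [h, not_le.mpr h]
    · have h' : cur + a ≤ B := not_lt.mp h
      simp [h, h', ih]

-- ===== VERDICT =====
theorem maxAmt_spec : Claim_equal_maxAmt := by
  intro A B _
  show maxAmt A B = maxAmt_alt A B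
  have h := take_firstBad B (prefixSums 0 A) 0 le_rfl
  simp only [zero_add, sub_zero] at h
  simp only [maxAmt, maxAmt_alt]
  rw [go_eq_fold, ← h]
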